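-- pv_equiv track=rewrite | github.com/mshsu/compsci-one | calcudoku/solver_funcs.py | check_columns_valid
-- ===== SOURCE A (Python) =====
-- def check_columns_valid(puzzle):
--     # Create new list of lists where each row in list is column, not row
--     # Then call check_rows_Valid
--     col_matrix = []
--     col_matrix_row = []
--     for col in range(0, 5):
--         for row in range(0, 5):
--             col_matrix_row.append(puzzle[row][col])
--         col_matrix.append(col_matrix_row)
--         col_matrix_row = []
--     return check_rows_valid(col_matrix)
--
-- def check_rows_valid(puzzle):
--     row = 0
--     value = 1
--     value_count = 0
--     while row <= 4 and value_count <= 1: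
--         while value <= 5 and value_count <= 1:
--             value_count = puzzle[row].count(value)
--             value += 1
--         row += 1
--         value = 1
--     if value_count > 1:
--         return False
--     else:
--         return True
-- ===== SOURCE B (Python) =====
-- def check_columns_valid(puzzle):
--     # Single pass per column: tally a frequency map of values 1..5; no transpose.
--     for col in range(5):
--         freq = {}
--         for row in range(5):
--             v = puzzle[row][col]
--             if 1 <= v <= 5:
--                 freq[v] = freq.get(v, 0) + 1
--         if any(c > 1 for c in freq.values()):
--             return False
--     return True
-- ===== Notes on version B (the rewrite author's own statement) =====
-- stated objective: alternative
-- what changed: B drops A's transpose-then-recheck pass and its repeated .count scans per value, instead tallying each column once into a frequency dict of the values 1-5 and failing as soon as some count exceeds 1.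
import Mathlib
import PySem

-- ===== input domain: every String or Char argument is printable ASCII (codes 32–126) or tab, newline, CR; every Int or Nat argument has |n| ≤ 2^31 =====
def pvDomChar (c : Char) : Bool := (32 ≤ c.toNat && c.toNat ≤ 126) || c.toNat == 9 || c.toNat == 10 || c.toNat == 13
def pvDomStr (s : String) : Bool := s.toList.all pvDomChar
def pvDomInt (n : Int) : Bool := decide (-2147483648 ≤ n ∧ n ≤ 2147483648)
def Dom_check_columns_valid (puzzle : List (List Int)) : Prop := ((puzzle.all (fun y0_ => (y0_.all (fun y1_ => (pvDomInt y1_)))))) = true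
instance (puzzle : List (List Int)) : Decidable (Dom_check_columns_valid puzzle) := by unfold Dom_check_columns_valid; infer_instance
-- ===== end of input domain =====

-- B replaces A's transpose + per-value .count rechecking by one frequency-dict tally pass per column
-- (an alternative decomposition of the same check; neither program mutates its argument).

-- ===== PORT A =====
-- puzzle[row][col]; the .getD defaults never fire inside Pre_ (an out-of-range access is
-- Python's IndexError, and exactly those inputs are excluded by Pre_).
def pvCell (puzzle : List (List Int)) (row col : Int) : Int :=
  (PySem.List.pyGet? ((PySem.List.pyGet? puzzle row).getD []) col).getD 0

-- inner while of check_rows_valid: 'while value <= 5 and value_count <= 1: value_count = puzzle[row].count(value); value += 1'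
def crInner (r : List Int) (value vc : Int) : Int :=
  if h : value ≤ 5 ∧ vc ≤ 1 then crInner r (value + 1) (PySem.List.count r value) else vc
termination_by (6 - value).toNat
decreasing_by omega

-- outer while of check_rows_valid: 'while row <= 4 and value_count <= 1: …; row += 1; value = 1'
def crOuter (p : List (List Int)) (row vc : Int) : Int :=
  if h : row ≤ 4 ∧ vc ≤ 1 then
    crOuter p (row + 1) (crInner ((PySem.List.pyGet? p row).getD []) 1 vc)
  else vc
termination_by (5 - row).toNat
decreasing_by omega

def check_rows_valid (p : List (List Int)) : Bool :=
  if crOuter p 0 0 > 1 then false else true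

def check_columns_valid (puzzle : List (List Int)) : Bool :=
  let colMatrix := (PySem.List.pyRange 0 5 1).foldl (fun acc col =>
      acc ++ [(PySem.List.pyRange 0 5 1).foldl (fun r row => r ++ [pvCell puzzle row col]) []]) []
  check_rows_valid colMatrix

-- ===== PORT B =====
-- freq = {}; for row in range(5): v = puzzle[row][col]; if 1 <= v <= 5: freq[v] = freq.get(v, 0) + 1
def pvFreq (puzzle : List (List Int)) (col : Int) : PySem.Dict Int Int :=
  (PySem.List.pyRange 0 5 1).foldl (fun d row =>
    let v := pvCell puzzle row col
    if 1 ≤ v ∧ v ≤ 5 then d.insert v (d.getD v 0 + 1) else d) PySem.Dict.empty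

-- 'for col in range(5): … ; if any(c > 1 for c in freq.values()): return False' / final 'return True'
def pvGoCols (puzzle : List (List Int)) : List Int → Bool
  | [] => true
  | c :: rest =>
    if (pvFreq puzzle c).values.any (fun x => decide (x > 1)) then false
    else pvGoCols puzzle rest

def check_columns_valid_alt (puzzle : List (List Int)) : Bool :=
  pvGoCols puzzle (PySem.List.pyRange 0 5 1)

-- ===== PRECONDITION & SPEC =====
-- Exactly where the Python A returns: A reads puzzle[row][col] for all row, col in 0..4, so it
-- raises IndexError iff the grid has fewer than 5 rows or one of the first 5 rows has fewer than 5 entries.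
def Pre_check_columns_valid (puzzle : List (List Int)) : Prop :=
  5 ≤ puzzle.length ∧ ∀ r ∈ puzzle.take 5, 5 ≤ r.length
instance (puzzle : List (List Int)) : Decidable (Pre_check_columns_valid puzzle) := by
  unfold Pre_check_columns_valid; infer_instance

def pvWitness_check_columns_valid : List (List Int) :=
  [[1,2,3,4,5],[2,3,4,5,1],[3,4,5,1,2],[4,5,1,2,3],[5,1,2,3,4]]

def Spec_check_columns_valid (puzzle : List (List Int)) (out : Bool) : Prop := out = check_columns_valid_alt puzzle
instance (puzzle : List (List Int)) (out : Bool) : Decidable (Spec_check_columns_valid puzzle out) := by unfold Spec_check_columns_valid; infer_instance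

-- ===== CLAIM (what is proved, stated in full; the proofs are below) =====
def Claim_equal_check_columns_valid : Prop := ∀ (puzzle : List (List Int)), Dom_check_columns_valid puzzle → Pre_check_columns_valid puzzle → Spec_check_columns_valid puzzle (check_columns_valid puzzle)

-- ===== LEMMAS AND PROOFS =====

-- column c of the (first 5 rows of the) grid, as both programs read it
def colL (p : List (List Int)) (c : Int) : List Int :=
  [pvCell p 0 c, pvCell p 1 c, pvCell p 2 c, pvCell p 3 c, pvCell p 4 c]

-- the inner while leaves value_count ≤ 1 iff it entered with vc ≤ 1 and no value in [value, 5] is duplicated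
theorem crInner_le_one (r : List Int) (value vc : Int) :
    crInner r value vc ≤ 1 ↔ vc ≤ 1 ∧ ∀ v : Int, value ≤ v → v ≤ 5 → (PySem.List.count r v : Int) ≤ 1 := by
  fun_induction crInner r value vc with
  | case1 value vc h ih =>
    rw [ih]
    constructor
    · rintro ⟨hc, hall⟩
      refine ⟨h.2, fun v hv1 hv2 => ?_⟩
      rcases eq_or_lt_of_le hv1 with he | hl
      · rw [← he]; exact hc
      · exact hall v (by omega) hv2
    · rintro ⟨h1, hall⟩
      exact ⟨hall value le_rfl h.1, fun v hv1 hv2 => hall v (by omega) hv2⟩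
  | case2 value vc h =>
    constructor
    · intro hvc
      refine ⟨hvc, fun v hv1 hv2 => ?_⟩
      exact absurd ⟨by omega, hvc⟩ h
    · exact fun hh => hh.1

theorem crOuter_le_one (p : List (List Int)) (row vc : Int) :
    crOuter p row vc ≤ 1 ↔ vc ≤ 1 ∧ ∀ r' : Int, row ≤ r' → r' ≤ 4 →
      ∀ v : Int, 1 ≤ v → v ≤ 5 → (PySem.List.count ((PySem.List.pyGet? p r').getD []) v : Int) ≤ 1 := by
  fun_induction crOuter p row vc with
  | case1 row vc h ih =>
    rw [ih, crInner_le_one]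
    constructor
    · rintro ⟨⟨hvc, hrow⟩, hall⟩
      refine ⟨hvc, fun r' hr1 hr2 v hv1 hv2 => ?_⟩
      rcases eq_or_lt_of_le hr1 with he | hl
      · rw [← he]; exact hrow v hv1 hv2
      · exact hall r' (by omega) hr2 v hv1 hv2
    · rintro ⟨hvc, hall⟩
      exact ⟨⟨hvc, fun v hv1 hv2 => hall row le_rfl h.1 v hv1 hv2⟩,
             fun r' hr1 hr2 v hv1 hv2 => hall r' (by omega) hr2 v hv1 hv2⟩
  | case2 row vc h =>
    constructor
    · intro hvc
      refine ⟨hvc, fun r' hr1 hr2 v hv1 hv2 => ?_⟩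
      exact absurd ⟨by omega, hvc⟩ h
    · exact fun hh => hh.1

theorem A_true_iff (p : List (List Int)) :
    check_columns_valid p = true ↔ ∀ c : Int, 0 ≤ c → c ≤ 4 →
      ∀ v : Int, 1 ≤ v → v ≤ 5 → (PySem.List.count (colL p c) v : Int) ≤ 1 := by
  have hM : check_columns_valid p = check_rows_valid [colL p 0, colL p 1, colL p 2, colL p 3, colL p 4] := rfl
  rw [hM, check_rows_valid]
  constructor
  · intro ht c hc1 hc2 v hv1 hv2
    have hle : crOuter [colL p 0, colL p 1, colL p 2, colL p 3, colL p 4] 0 0 ≤ 1 := by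
      by_contra hgt
      simp only [if_pos (by omega : crOuter [colL p 0, colL p 1, colL p 2, colL p 3, colL p 4] 0 0 > 1)] at ht
      exact Bool.false_ne_true ht
    have := (crOuter_le_one _ 0 0).mp hle
    have h2 := this.2 c hc1 hc2 v hv1 hv2
    interval_cases c <;> simpa [PySem.List.pyGet?] using h2
  · intro hall
    have hle : crOuter [colL p 0, colL p 1, colL p 2, colL p 3, colL p 4] 0 0 ≤ 1 := by
      rw [crOuter_le_one]
      refine ⟨by omega, fun r' hr1 hr2 v hv1 hv2 => ?_⟩
      have := hall r' hr1 hr2 v hv1 hv2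
      interval_cases r' <;> simpa [PySem.List.pyGet?] using this
    rw [if_neg (by omega)]

theorem foldl_if_filter (xs : List Int) (d : PySem.Dict Int Int) :
    xs.foldl (fun d v => if 1 ≤ v ∧ v ≤ 5 then d.insert v (d.getD v 0 + 1) else d) d
      = (xs.filter (fun v => decide (1 ≤ v ∧ v ≤ 5))).foldl
          (fun d v => d.insert v (d.getD v 0 + 1)) d := by
  induction xs generalizing d with
  | nil => rfl
  | cons x t ih =>
    by_cases hx : 1 ≤ x ∧ x ≤ 5 <;>
      simp [hx, List.foldl_cons, ih]

theorem pvFreq_eq_counter (p : List (List Int)) (c : Int) :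
    pvFreq p c = PySem.Dict.counter ((colL p c).filter (fun v => decide (1 ≤ v ∧ v ≤ 5))) := by
  have h1 : pvFreq p c = (colL p c).foldl
      (fun d v => if 1 ≤ v ∧ v ≤ 5 then d.insert v (d.getD v 0 + 1) else d) PySem.Dict.empty := rfl
  rw [h1, foldl_if_filter, PySem.Dict.foldl_insert_getD_add_one_eq_counter]

theorem colOk_iff (p : List (List Int)) (c : Int) :
    ((pvFreq p c).values.any (fun x => decide (x > 1)) = false) ↔
      ∀ v : Int, 1 ≤ v → v ≤ 5 → (PySem.List.count (colL p c) v : Int) ≤ 1 := by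
  rw [pvFreq_eq_counter]
  set f := (colL p c).filter (fun v => decide (1 ≤ v ∧ v ≤ 5)) with hf
  rw [PySem.Dict.values_eq_map_keys _ (PySem.Dict.nodup_keys_counter f) 0]
  simp only [List.any_eq_false, List.mem_map]
  constructor
  · intro hall v hv1 hv2
    by_cases hm : v ∈ f
    · have hk : v ∈ (PySem.Dict.counter f).keys := by
        rw [PySem.Dict.keys_counter]; exact (PySem.Set.mem_ofList _ _).mpr hm
      have := hall _ ⟨v, hk, rfl⟩
      rw [PySem.Dict.getD_counter] at this
      have hcf : f.count v = (colL p c).count v := by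
        rw [hf]; exact List.count_filter (by simp [hv1, hv2])
      simp only [decide_eq_true_eq, not_lt] at this
      rw [PySem.List.count_eq]
      omega
    · have : v ∉ colL p c := fun hvc => hm (List.mem_filter.mpr ⟨hvc, by simp [hv1, hv2]⟩)
      rw [PySem.List.count_eq, List.count_eq_zero.mpr this]
      omega
  · rintro hall x ⟨k, hk, rfl⟩
    rw [PySem.Dict.keys_counter] at hk
    have hkf : k ∈ f := (PySem.Set.mem_ofList _ _).mp hk
    have hP : 1 ≤ k ∧ k ≤ 5 := by
      have := List.of_mem_filter hkf
      simpa using this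
    have hle := hall k hP.1 hP.2
    rw [PySem.Dict.getD_counter]
    have hcf : f.count k = (colL p c).count k := by
      rw [hf]; exact List.count_filter (by simp [hP.1, hP.2])
    rw [PySem.List.count_eq] at hle
    simp only [decide_eq_true_eq, not_lt]
    omega

theorem B_true_iff (p : List (List Int)) :
    check_columns_valid_alt p = true ↔ ∀ c : Int, 0 ≤ c → c ≤ 4 →
      ∀ v : Int, 1 ≤ v → v ≤ 5 → (PySem.List.count (colL p c) v : Int) ≤ 1 := by
  have h0 : check_columns_valid_alt p = pvGoCols p [0, 1, 2, 3, 4] := rfl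
  rw [h0]
  simp only [pvGoCols]
  constructor
  · intro ht c hc1 hc2 v hv1 hv2
    split_ifs at ht
    rename_i h1 h2 h3 h4 h5
    have := fun (i : Int) (h : ((pvFreq p i).values.any (fun x => decide (x > 1))) = false) =>
      (colOk_iff p i).mp h v hv1 hv2
    interval_cases c
    · exact this 0 (by simpa using h1)
    · exact this 1 (by simpa using h2)
    · exact this 2 (by simpa using h3)
    · exact this 3 (by simpa using h4)
    · exact this 4 (by simpa using h5)
  · intro hall
    have hok : ∀ c : Int, 0 ≤ c → c ≤ 4 → ((pvFreq p c).values.any (fun x => decide (x > 1))) = false :=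
      fun c h1 h2 => (colOk_iff p c).mpr (hall c h1 h2)
    rw [if_neg, if_neg, if_neg, if_neg, if_neg] <;>
      simp [hok 0 (by omega) (by omega), hok 1 (by omega) (by omega), hok 2 (by omega) (by omega),
        hok 3 (by omega) (by omega), hok 4 (by omega) (by omega)]

-- ===== VERDICT (by name: the statement is the Claim_ definition above) =====
theorem check_columns_valid_spec : Claim_equal_check_columns_valid := by
  intro p _hdom _hpre
  unfold Spec_check_columns_valid
  have h : (check_columns_valid p = true) ↔ (check_columns_valid_alt p = true) :=
    (A_true_iff p).trans (B_true_iff p).symm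
  exact Bool.coe_iff_coe.mp h
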